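-- pv_equiv track=rewrite | github.com/JustinR840/CS480P3 | main.py | GenerateSuccessors
-- ===== SOURCE A (Python) =====
-- def GenerateSuccessors(key):
-- 	for i in range(0, len(key)):
-- 		for j in range(i, len(key) + 1):
-- 			newKeyStart = key[0:i]
--
-- 			# We want to swap only from 0 to n.
-- 			# The slice below will make a new list consisting of
-- 			# elements 0 to i (not including element i).
-- 			newKeyReversedMiddle = key[i:j]
--
-- 			# Reverses that list.
-- 			newKeyReversedMiddle = newKeyReversedMiddle[::-1]
--
-- 			# Grid the elements from i to the end, where the end can
-- 			# just be defined as the length of the key.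
-- 			newKeyEnd = key[j:len(key)]
--
-- 			# Create a final list with the original start,
-- 			# reversed middle and normal end.
-- 			newKey = newKeyStart + newKeyReversedMiddle + newKeyEnd
--
-- 			yield newKey
-- ===== SOURCE B (Python) =====
-- def GenerateSuccessors(key):
--     # Index-free peel: pre/rest split advances one element per outer step;
--     # inner loop moves elements from suf onto a reversed-middle accumulator.
--     pre = key[:0]
--     rest = key[:]
--     while rest:
--         mid = rest[:0]
--         suf = rest
--         while True:
--             yield pre + mid + suf
--             if not suf:
--                 break
--             mid = suf[:1] + mid
--             suf = suf[1:]
--         pre = pre + rest[:1]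
--         rest = rest[1:]
-- ===== Notes on version B (the rewrite author's own statement) =====
-- stated objective: alternative
-- what changed: Replaces the index/slice double loop (four fresh slices and a [::-1] reversal per yield) with an index-free peel: the key is split once into pre/rest, and an inner loop moves one element at a time from the suffix onto a reversed-middle accumulator, so each successor is built by constant-size list surgery and no slice reversal.
import Mathlib
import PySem

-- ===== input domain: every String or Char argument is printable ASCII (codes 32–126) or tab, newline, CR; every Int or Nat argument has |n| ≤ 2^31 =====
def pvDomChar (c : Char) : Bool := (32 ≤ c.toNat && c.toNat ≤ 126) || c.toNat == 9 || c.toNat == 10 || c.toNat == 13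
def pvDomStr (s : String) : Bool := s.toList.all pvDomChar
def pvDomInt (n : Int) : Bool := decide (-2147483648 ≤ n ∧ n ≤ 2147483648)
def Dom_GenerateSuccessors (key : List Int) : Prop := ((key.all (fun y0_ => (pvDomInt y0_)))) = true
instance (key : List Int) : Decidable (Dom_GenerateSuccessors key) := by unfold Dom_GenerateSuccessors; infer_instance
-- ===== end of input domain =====

-- B replaces the index/slice double loop with an index-free peel using a reversed-middle
-- accumulator (alternative decomposition; same asymptotic cost).


-- ===== PORT A =====
-- literal transliteration of A: for i in range(len(key)): for j in range(i, len(key)+1):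
-- yield key[0:i] + key[i:j][::-1] + key[j:len(key)]
def GenerateSuccessors (key : List Int) : List (List Int) :=
  (PySem.List.pyRange 0 (key.length : Int)).foldl (fun acc i =>
    (PySem.List.pyRange i ((key.length : Int) + 1)).foldl (fun acc2 j =>
      let newKeyStart := PySem.List.slice key (some 0) (some i)
      let newKeyReversedMiddle := PySem.List.slice key (some i) (some j)
      let newKeyReversedMiddle := newKeyReversedMiddle.reverse
      let newKeyEnd := PySem.List.slice key (some j) (some (key.length : Int))
      acc2 ++ [newKeyStart ++ newKeyReversedMiddle ++ newKeyEnd]) acc) []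

-- ===== PORT B =====
-- inner while loop of Source B: yield pre+mid+suf; then move the head of suf onto mid
def pvAltInner (pre mid suf : List Int) (acc : List (List Int)) : List (List Int) :=
  match suf with
  | [] => acc ++ [pre ++ mid ++ []]
  | x :: rest => pvAltInner pre (x :: mid) rest (acc ++ [pre ++ mid ++ (x :: rest)])

-- outer while loop of Source B: advance the pre/rest split by one element
def pvAltOuter (pre rest : List Int) (acc : List (List Int)) : List (List Int) :=
  match rest with
  | [] => acc
  | x :: rest' => pvAltOuter (pre ++ [x]) rest' (pvAltInner pre [] (x :: rest') acc)

def GenerateSuccessors_alt (key : List Int) : List (List Int) :=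
  pvAltOuter [] key []

-- ===== PRECONDITION & SPEC =====
def Spec_GenerateSuccessors (key : List Int) (out : List (List Int)) : Prop := out = GenerateSuccessors_alt key
instance (key : List Int) (out : List (List Int)) : Decidable (Spec_GenerateSuccessors key out) := by unfold Spec_GenerateSuccessors; infer_instance

-- ===== CLAIM (what is proved, stated in full; the proofs are below) =====
def Claim_equal_GenerateSuccessors : Prop := ∀ (key : List Int), Dom_GenerateSuccessors key → Spec_GenerateSuccessors key (GenerateSuccessors key)

-- ===== LEMMAS AND PROOFS =====

-- common closed form: successor (i,k) reverses the k-element block starting at i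
def pvClosed (key : List Int) : List (List Int) :=
  (List.range key.length).flatMap (fun i =>
    (List.range (key.length - i + 1)).map (fun k =>
      key.take i ++ ((key.drop i).take k).reverse ++ key.drop (i + k)))

lemma pvPyRange_natCast (i m : Nat) :
    PySem.List.pyRange (i : Int) (m : Int) = (List.range (m - i)).map (fun k => ((i + k : Nat) : Int)) := by
  by_cases h : i < m
  · obtain ⟨d, rfl⟩ : ∃ d, m = i + (d + 1) := ⟨m - i - 1, by omega⟩
    clear h
    induction d generalizing i with
    | zero =>
      rw [PySem.List.pyRange_one_cons (by exact_mod_cast Nat.lt_succ_self i),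
          PySem.List.pyRange_one_eq_nil (by push_cast; omega)]
      simp
    | succ d ih =>
      rw [PySem.List.pyRange_one_cons (by push_cast; omega)]
      rw [show i + (d + 1 + 1) = i + 1 + (d + 1) from by omega]
      rw [show ((i : Int) + 1) = ((i + 1 : Nat) : Int) from by push_cast; ring]
      rw [ih (i + 1)]
      rw [show i + 1 + (d + 1) - i = (i + 1 + (d + 1) - (i + 1)) + 1 from by omega,
          List.range_succ_eq_map]
      simp only [List.map_map, List.map_cons, List.cons.injEq]
      refine ⟨by push_cast; omega, ?_⟩
      apply List.map_congr_left
      intro k _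
      simp only [Function.comp_apply]
      push_cast
      ring
  · rw [PySem.List.pyRange_one_eq_nil (by exact_mod_cast Nat.le_of_not_lt h)]
    have : m - i = 0 := by omega
    simp [this]

lemma pvTakeDrop (l : List Int) (m : Nat) : (l.drop m).take (l.length - m) = l.drop m := by
  rw [← List.length_drop]
  exact List.take_length

lemma pvA_eq_closed (key : List Int) : GenerateSuccessors key = pvClosed key := by
  unfold GenerateSuccessors pvClosed
  simp only [PySem.List.foldl_append_singleton_eq_map, PySem.List.foldl_append_eq_flatMap]
  rw [PySem.List.pyRange_zero_natCast]
  simp only [List.flatMap_map, List.nil_append]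
  apply List.flatMap_congr
  intro i hi
  have hi' : i < key.length := List.mem_range.mp hi
  rw [show ((key.length : Int) + 1) = ((key.length + 1 : Nat) : Int) from by push_cast; ring,
      pvPyRange_natCast i (key.length + 1), List.map_map,
      show key.length + 1 - i = key.length - i + 1 from by omega]
  apply List.map_congr_left
  intro k _
  simp only [Function.comp_apply, PySem.List.slice_zero_start, PySem.List.slice_to_natCast,
    PySem.List.slice_natCast, Nat.add_sub_cancel_left]
  rw [pvTakeDrop]

lemma pvInner_eq (suf : List Int) : ∀ (pre mid : List Int) (acc : List (List Int)),
    pvAltInner pre mid suf acc =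
      acc ++ (List.range (suf.length + 1)).map
        (fun k => pre ++ (suf.take k).reverse ++ mid ++ suf.drop k) := by
  induction suf with
  | nil => intro pre mid acc; simp [pvAltInner]
  | cons x rest ih =>
    intro pre mid acc
    rw [pvAltInner, ih]
    conv_rhs => rw [List.length_cons, List.range_succ_eq_map]
    simp [List.map_map, Function.comp, List.append_assoc]

lemma pvOuter_eq (rest : List Int) : ∀ (pre : List Int) (acc : List (List Int)),
    pvAltOuter pre rest acc =
      acc ++ (List.range rest.length).flatMap (fun i =>
        (List.range (rest.length - i + 1)).map (fun k =>
          pre ++ rest.take i ++ ((rest.drop i).take k).reverse ++ rest.drop (i + k))) := by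
  induction rest with
  | nil => intro pre acc; simp [pvAltOuter]
  | cons x rest' ih =>
    intro pre acc
    rw [pvAltOuter, ih, pvInner_eq]
    conv_rhs => rw [List.length_cons, List.range_succ_eq_map]
    simp only [List.flatMap_cons, List.flatMap_map, List.append_assoc, List.nil_append,
      List.take_zero, List.drop_zero, List.length_cons, Nat.sub_zero, Nat.zero_add]
    congr 1
    congr 1
    apply List.flatMap_congr
    intro i _
    rw [show rest'.length + 1 - Nat.succ i + 1 = rest'.length - i + 1 from by omega]
    apply List.map_congr_left
    intro k _
    rw [show Nat.succ i + k = (i + k) + 1 from by omega]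
    simp [List.take_succ_cons, List.drop_succ_cons]

lemma pvB_eq_closed (key : List Int) : GenerateSuccessors_alt key = pvClosed key := by
  unfold GenerateSuccessors_alt pvClosed
  rw [pvOuter_eq]
  simp

-- ===== VERDICT (by name: the statement is the Claim_ definition above) =====
theorem GenerateSuccessors_spec : Claim_equal_GenerateSuccessors := by
  intro key _
  unfold Spec_GenerateSuccessors
  rw [pvA_eq_closed, pvB_eq_closed]
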